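-- pv_equiv track=rewrite | github.com/jmorris335/DesAuto_Project | ReadSTL.py | getTextBetweenSpaces
-- ===== SOURCE A (Python) =====
-- def getTextBetweenSpaces(line: str):
--     ''' Returns a list of all the words in the inputted string ("line")
--     that are seperated by spaces'''
--     out = list()
--     indices = [i for i in range(len(line)) if line.startswith(" ", i)]
--     indices.append(len(line))
--     for i in range(len(indices)-1):
--         try:
--             word = line[indices[i] : indices[i+1]]
--         except: continue
--         else: out.append(word)
--     return out
-- ===== SOURCE B (Python) =====
-- def getTextBetweenSpaces(line: str):
--     '''Single left-to-right pass: a space starts a new chunk; characters before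
--     the first space are dropped; each chunk is a space plus the following run
--     of non-space characters.'''
--     out = []
--     cur = None
--     for ch in line:
--         if ch == ' ':
--             if cur is not None:
--                 out.append(cur)
--             cur = ' '
--         elif cur is not None:
--             cur += ch
--     if cur is not None:
--         out.append(cur)
--     return out
-- ===== Notes on version B (the rewrite author's own statement) =====
-- stated objective: faster
-- what changed: Replaced the two-pass build-a-list-of-space-indices-then-slice-between-consecutive-indices algorithm by a single left-to-right scan with one accumulator that starts a chunk at each space and extends it with non-space characters.
import Mathlib
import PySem

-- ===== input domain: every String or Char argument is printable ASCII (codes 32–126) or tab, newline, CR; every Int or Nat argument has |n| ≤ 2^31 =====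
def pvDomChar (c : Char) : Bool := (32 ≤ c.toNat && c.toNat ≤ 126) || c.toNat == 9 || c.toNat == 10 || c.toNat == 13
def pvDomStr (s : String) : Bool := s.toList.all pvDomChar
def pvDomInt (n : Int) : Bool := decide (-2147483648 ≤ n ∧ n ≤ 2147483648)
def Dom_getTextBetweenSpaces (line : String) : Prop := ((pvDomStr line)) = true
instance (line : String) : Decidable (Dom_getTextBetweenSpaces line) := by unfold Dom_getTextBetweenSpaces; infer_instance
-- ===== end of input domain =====

-- B replaces A's space-index list plus slicing-between-consecutive-indices by a single
-- left-to-right scan with one chunk accumulator (objective: simpler, one pass).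

-- ===== PORT A =====
-- indices = [i for i in range(len(line)) if line.startswith(" ", i)]
-- line.startswith(" ", i) for 0 ≤ i is exactly "character i exists and is ' '",
-- i.e. (l.drop i).take 1 = [' ']  (exact for the nonnegative i produced by range).
def aIndices (l : List Char) : List Nat :=
  (List.range l.length).filter (fun i => ((l.drop i).take 1) == [' '])

-- the for-loop: for i in range(len(indices)-1): out.append(line[indices[i]:indices[i+1]])
-- line[a:b] for 0 ≤ a, b is (l.take b).drop a (exact for nonnegative indices);
-- the try/except wraps a slice, which never raises, so every iteration appends.
def aChunks (l : List Char) (idx2 : List Nat) : List String :=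
  (List.range (idx2.length - 1)).foldl
    (fun out i => out ++ [String.mk ((l.take (idx2.getD (i+1) 0)).drop (idx2.getD i 0))]) []

def getTextBetweenSpaces (line : String) : List String :=
  aChunks line.toList (aIndices line.toList ++ [line.toList.length])

-- ===== PORT B =====
-- single pass: state (out, cur); a space flushes cur and starts a new chunk ' ',
-- a non-space char is appended to cur when one is open; final flush.
def bStep (s : List String × Option (List Char)) (ch : Char) : List String × Option (List Char) :=
  if ch = ' ' then
    (match s.2 with | some w => s.1 ++ [String.mk w] | none => s.1, some [' '])
  else
    match s.2 with
    | some w => (s.1, some (w ++ [ch]))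
    | none => (s.1, none)

def bFinish (s : List String × Option (List Char)) : List String :=
  match s.2 with | some w => s.1 ++ [String.mk w] | none => s.1

def getTextBetweenSpaces_alt (line : String) : List String :=
  bFinish (line.toList.foldl bStep ([], none))

-- ===== PRECONDITION & SPEC =====
def Spec_getTextBetweenSpaces (line : String) (out : List String) : Prop := out = getTextBetweenSpaces_alt line
instance (line : String) (out : List String) : Decidable (Spec_getTextBetweenSpaces line out) := by unfold Spec_getTextBetweenSpaces; infer_instance

-- ===== CLAIM (what is proved, stated in full; the proofs are below) =====
def Claim_equal_getTextBetweenSpaces : Prop := ∀ (line : String), Dom_getTextBetweenSpaces line → Spec_getTextBetweenSpaces line (getTextBetweenSpaces line)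

-- ===== LEMMAS AND PROOFS =====

-- common specification both ports are reduced to
def gSpec : List Char → List String
  | [] => []
  | c :: cs => if c = ' ' then String.mk (' ' :: cs.takeWhile (· ≠ ' ')) :: gSpec cs else gSpec cs

-- pairwise-slicing recursion equivalent to A's indexed loop
def pairRec (l : List Char) : List Nat → List String
  | a :: b :: rest => String.mk ((l.take b).drop a) :: pairRec l (b :: rest)
  | _ => []

lemma foldl_append_map {α β : Type} (f : α → β) :
    ∀ (xs : List α) (acc : List β),
      xs.foldl (fun out i => out ++ [f i]) acc = acc ++ xs.map f := by
  intro xs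
  induction xs with
  | nil => simp
  | cons x xs ih => intro acc; simp [List.foldl, ih]

lemma rangeMap_pairRec (l : List Char) :
    ∀ js : List Nat,
      (List.range (js.length - 1)).map
          (fun i => String.mk ((l.take (js.getD (i+1) 0)).drop (js.getD i 0)))
        = pairRec l js := by
  intro js
  match js with
  | [] => simp [pairRec]
  | [a] => simp [pairRec]
  | a :: b :: rest =>
    have ih := rangeMap_pairRec l (b :: rest)
    have hlen : (a :: b :: rest).length - 1 = ((b :: rest).length - 1) + 1 := by
      simp
    rw [hlen, List.range_succ_eq_map, List.map_cons, List.map_map]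
    simp only [pairRec]
    congr 1

lemma aChunks_pairRec (l : List Char) (js : List Nat) :
    aChunks l js = pairRec l js := by
  unfold aChunks
  rw [foldl_append_map, List.nil_append, rangeMap_pairRec]

lemma aIndices_cons (c : Char) (cs : List Char) :
    aIndices (c :: cs)
      = (if c = ' ' then [0] else []) ++ (aIndices cs).map (· + 1) := by
  unfold aIndices
  rw [List.length_cons, List.range_succ_eq_map, List.filter_cons, List.filter_map]
  have hp : ∀ i ∈ List.range cs.length,
      ((fun i => ((c :: cs).drop i).take 1 == [' ']) ∘ Nat.succ) i
        = (fun i => ((cs.drop i).take 1 == [' '])) i := fun i _ => rfl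
  rw [List.filter_congr hp]
  have hm : List.map Nat.succ ((List.range cs.length).filter (fun i => ((cs.drop i).take 1 == [' '])))
      = List.map (fun i : Nat => i + 1) ((List.range cs.length).filter (fun i => ((cs.drop i).take 1 == [' ']))) :=
    List.map_congr_left (fun i _ => rfl)
  rw [hm]
  by_cases h : c = ' ' <;> simp [h]

lemma pairRec_shift (c : Char) (cs : List Char) :
    ∀ js : List Nat, pairRec (c :: cs) (js.map (· + 1)) = pairRec cs js := by
  intro js
  match js with
  | [] => simp [pairRec]
  | [a] => simp [pairRec]
  | a :: b :: rest =>
    have ih := pairRec_shift c cs (b :: rest)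
    simp only [List.map_cons, pairRec] at *
    rw [ih, List.take_succ_cons, List.drop_succ_cons]

-- the first space position in cs (or its length) is the length of the space-free prefix
lemma aIndices_head (cs : List Char) :
    (aIndices cs ++ [cs.length]).headD 0 = (cs.takeWhile (· ≠ ' ')).length := by
  induction cs with
  | nil => simp [aIndices]
  | cons c cs ih =>
    rw [aIndices_cons]
    by_cases h : c = ' '
    · simp [h, List.takeWhile]
    · cases hA : aIndices cs with
      | nil => rw [hA] at ih; simp_all [List.takeWhile]
      | cons k ks => rw [hA] at ih; simp_all [List.takeWhile]

lemma take_takeWhile_len (p : Char → Bool) :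
    ∀ l : List Char, l.take ((l.takeWhile p).length) = l.takeWhile p := by
  intro l
  induction l with
  | nil => simp
  | cons c cs ih =>
    by_cases h : p c <;> simp [List.takeWhile, h, ih]

lemma map_append_ne_nil (js : List Nat) (n : Nat) :
    (js ++ [n]).map (· + 1) ≠ [] := by
  simp

-- A's core equals the common specification
lemma A_eq_gSpec : ∀ l : List Char, pairRec l (aIndices l ++ [l.length]) = gSpec l := by
  intro l
  induction l with
  | nil => simp [aIndices, pairRec, gSpec]
  | cons c cs ih =>
    rw [aIndices_cons, List.length_cons]
    by_cases h : c = ' '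
    · -- indices = 0 :: (aIndices cs ++ [cs.length]).map (·+1)
      have hlist : (if c = ' ' then [0] else []) ++ (aIndices cs).map (· + 1) ++ [cs.length + 1]
          = 0 :: ((aIndices cs ++ [cs.length]).map (· + 1)) := by
        simp [h]
      rw [hlist]
      cases hM : (aIndices cs ++ [cs.length]).map (· + 1) with
      | nil => exact absurd hM (map_append_ne_nil _ _)
      | cons b rest =>
        have hb : b = (aIndices cs ++ [cs.length]).headD 0 + 1 := by
          cases hJ : aIndices cs ++ [cs.length] with
          | nil => simp [hJ] at hM
          | cons j js => rw [hJ] at hM; simp at hM; simp [hM.1]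
        simp only [pairRec]
        rw [← hM, pairRec_shift, ih]
        have hbv : b = (cs.takeWhile (· ≠ ' ')).length + 1 := by
          rw [hb, aIndices_head]
        have htake : ((c :: cs).take b).drop 0 = ' ' :: cs.takeWhile (· ≠ ' ') := by
          rw [hbv, List.drop_zero, List.take_succ_cons, take_takeWhile_len, h]
        rw [htake]
        simp [gSpec, h]
    · have hlist : (if c = ' ' then [0] else []) ++ (aIndices cs).map (· + 1) ++ [cs.length + 1]
          = (aIndices cs ++ [cs.length]).map (· + 1) := by
        simp [h]
      rw [hlist, pairRec_shift, ih]
      simp [gSpec, h]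

-- B's fold with an open chunk
lemma B_inv_some : ∀ (l : List Char) (out : List String) (w : List Char),
    bFinish (l.foldl bStep (out, some w))
      = out ++ [String.mk (w ++ l.takeWhile (· ≠ ' '))] ++ gSpec l := by
  intro l
  induction l with
  | nil => intro out w; simp [bFinish, gSpec]
  | cons c cs ih =>
    intro out w
    by_cases h : c = ' '
    · subst h
      have hstep : ∀ s : List String × Option (List Char), bStep s ' '
          = (match s.2 with | some w => s.1 ++ [String.mk w] | none => s.1, some [' ']) := by
        intro s; simp [bStep]
      simp only [List.foldl, hstep]
      rw [ih]
      simp [List.takeWhile, gSpec]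
    · simp only [List.foldl, bStep, if_neg h]
      rw [ih]
      simp [List.takeWhile, h, gSpec]

-- B's fold with no open chunk equals the common specification
lemma B_eq_gSpec : ∀ (l : List Char) (out : List String),
    bFinish (l.foldl bStep (out, none)) = out ++ gSpec l := by
  intro l
  induction l with
  | nil => intro out; simp [bFinish, gSpec]
  | cons c cs ih =>
    intro out
    by_cases h : c = ' '
    · subst h
      have hstep : ∀ s : List String × Option (List Char), bStep s ' '
          = (match s.2 with | some w => s.1 ++ [String.mk w] | none => s.1, some [' ']) := by
        intro s; simp [bStep]
      simp only [List.foldl, hstep]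
      rw [B_inv_some]
      simp [gSpec]
    · simp only [List.foldl, bStep, if_neg h]
      rw [ih]
      simp [gSpec, h]

-- ===== VERDICT (by name: the statement is the Claim_ definition above) =====
theorem getTextBetweenSpaces_spec : Claim_equal_getTextBetweenSpaces := by
  intro line _
  unfold Spec_getTextBetweenSpaces getTextBetweenSpaces getTextBetweenSpaces_alt
  rw [aChunks_pairRec, A_eq_gSpec, B_eq_gSpec, List.nil_append]
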